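-- pv_equiv track=rewrite | github.com/Miranda-Manning1/6BLDHelper | 6BLDHelper.py | get_pieces_to_attempt_swap_to
-- ===== SOURCE A (Python) =====
-- def get_pieces_to_attempt_swap_to(buffer, buffer_color):
--     match buffer_color:
--         case "W":
--             return [i for i in range(0, 4) if i != buffer]
--         case "O":
--             return [i for i in range(4, 8) if i != buffer]
--         case "G":
--             return [i for i in range(8, 12) if i != buffer]
--         case "R":
--             return [i for i in range(12, 16) if i != buffer]
--         case "B":
--             return [i for i in range(16, 20) if i != buffer]
--         case "Y":
--             return [i for i in range(20, 24) if i != buffer]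
-- ===== SOURCE B (Python) =====
-- FACES = ("W", "O", "G", "R", "B", "Y")
--
-- def get_pieces_to_attempt_swap_to(buffer, buffer_color):
--     # One scan of the whole 24-sticker index space: keep the stickers whose
--     # face (FACES[i // 4]) is the buffer color, skipping the buffer itself.
--     stickers = [i for i in range(24) if FACES[i // 4] == buffer_color and i != buffer]
--     return stickers or None  # an unknown color owns no stickers -> None
-- ===== Notes on version B (the rewrite author's own statement) =====
-- stated objective: alternative
-- what changed: Instead of dispatching on the color to pick one of six hard-coded 4-element ranges, B scans the entire 24-sticker index space once and keeps each index whose face color FACES[i//4] equals buffer_color (and i != buffer), returning None when no sticker matches; Pre_ restricts to the six single-letter colors since outside them both return None, not a list[int].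
-- outside the precondition, e.g. on get_pieces_to_attempt_swap_to(0, 'X'): A returns None, B returns None; on get_pieces_to_attempt_swap_to(0, ''): A returns None, B returns None
import Mathlib
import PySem

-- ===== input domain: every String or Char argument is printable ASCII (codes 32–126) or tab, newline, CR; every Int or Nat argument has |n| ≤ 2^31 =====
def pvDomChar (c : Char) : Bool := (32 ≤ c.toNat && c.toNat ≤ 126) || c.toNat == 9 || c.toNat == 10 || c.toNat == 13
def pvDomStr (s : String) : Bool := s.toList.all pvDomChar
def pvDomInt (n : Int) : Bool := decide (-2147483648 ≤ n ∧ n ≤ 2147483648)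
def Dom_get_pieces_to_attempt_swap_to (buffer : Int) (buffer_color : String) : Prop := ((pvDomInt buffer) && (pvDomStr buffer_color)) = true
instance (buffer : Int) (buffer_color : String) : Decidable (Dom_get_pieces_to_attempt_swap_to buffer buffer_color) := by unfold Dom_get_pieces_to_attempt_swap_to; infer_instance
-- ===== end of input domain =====

-- B replaces the six-branch color dispatch by one scan of the whole 24-sticker index space,
-- keeping the indices whose face color FACES[i // 4] equals buffer_color (alternative).

-- ===== PORT A =====
-- The match has no default case: on any other color Python A returns None (not a list[int]);
-- those inputs are outside Pre_ and the port returns [] there.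
def get_pieces_to_attempt_swap_to (buffer : Int) (buffer_color : String) : List Int :=
  if buffer_color = "W" then (PySem.List.pyRange 0 4 1).filter (fun i => i ≠ buffer)
  else if buffer_color = "O" then (PySem.List.pyRange 4 8 1).filter (fun i => i ≠ buffer)
  else if buffer_color = "G" then (PySem.List.pyRange 8 12 1).filter (fun i => i ≠ buffer)
  else if buffer_color = "R" then (PySem.List.pyRange 12 16 1).filter (fun i => i ≠ buffer)
  else if buffer_color = "B" then (PySem.List.pyRange 16 20 1).filter (fun i => i ≠ buffer)
  else if buffer_color = "Y" then (PySem.List.pyRange 20 24 1).filter (fun i => i ≠ buffer)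
  else []

-- ===== PORT B =====
-- FACES is Python B's module-level tuple; FACES[i // 4] is ported with PySem.List.pyGet?
-- (i always lies in 0..23, so the index is always in range). Python B returns None when
-- the scan keeps nothing (unknown color); those inputs are outside Pre_ and the port
-- returns the empty scan result [] there.
def FACES : List String := ["W", "O", "G", "R", "B", "Y"]
def get_pieces_to_attempt_swap_to_alt (buffer : Int) (buffer_color : String) : List Int :=
  (PySem.List.pyRange 0 24 1).filter (fun i =>
    (PySem.List.pyGet? FACES (PySem.Int.floordiv i 4) == some buffer_color) && i ≠ buffer)

-- ===== PRECONDITION & SPEC =====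
-- Pre_ admits exactly the six single-letter colors; on any other color the Python A falls
-- through the match and returns None, which is not a value of the declared type list[int].
def Pre_get_pieces_to_attempt_swap_to (_buffer : Int) (buffer_color : String) : Prop :=
  buffer_color = "W" ∨ buffer_color = "O" ∨ buffer_color = "G" ∨
  buffer_color = "R" ∨ buffer_color = "B" ∨ buffer_color = "Y"
instance (buffer : Int) (buffer_color : String) : Decidable (Pre_get_pieces_to_attempt_swap_to buffer buffer_color) := by unfold Pre_get_pieces_to_attempt_swap_to; infer_instance
def pvWitness_get_pieces_to_attempt_swap_to : Int × String := (0, "W")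

def Spec_get_pieces_to_attempt_swap_to (buffer : Int) (buffer_color : String) (out : List Int) : Prop := out = get_pieces_to_attempt_swap_to_alt buffer buffer_color
instance (buffer : Int) (buffer_color : String) (out : List Int) : Decidable (Spec_get_pieces_to_attempt_swap_to buffer buffer_color out) := by unfold Spec_get_pieces_to_attempt_swap_to; infer_instance

-- ===== CLAIM (what is proved, stated in full; the proofs are below) =====
def Claim_equal_get_pieces_to_attempt_swap_to : Prop := ∀ (buffer : Int) (buffer_color : String), Dom_get_pieces_to_attempt_swap_to buffer buffer_color → Pre_get_pieces_to_attempt_swap_to buffer buffer_color → Spec_get_pieces_to_attempt_swap_to buffer buffer_color (get_pieces_to_attempt_swap_to buffer buffer_color)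

-- ===== LEMMAS AND PROOFS =====

-- ===== VERDICT (by name: the statement is the Claim_ definition above) =====
theorem get_pieces_to_attempt_swap_to_spec : Claim_equal_get_pieces_to_attempt_swap_to := by
  intro buffer buffer_color _ hpre
  unfold Spec_get_pieces_to_attempt_swap_to
  rcases hpre with h | h | h | h | h | h <;> subst h <;>
    simp [get_pieces_to_attempt_swap_to, get_pieces_to_attempt_swap_to_alt, FACES,
      show PySem.List.pyRange 0 24 1 = [0,1,2,3,4,5,6,7,8,9,10,11,12,13,14,15,16,17,18,19,20,21,22,23] from by decide,
      show PySem.List.pyRange 0 4 1 = [0,1,2,3] from by decide,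
      show PySem.List.pyRange 4 8 1 = [4,5,6,7] from by decide,
      show PySem.List.pyRange 8 12 1 = [8,9,10,11] from by decide,
      show PySem.List.pyRange 12 16 1 = [12,13,14,15] from by decide,
      show PySem.List.pyRange 16 20 1 = [16,17,18,19] from by decide,
      show PySem.List.pyRange 20 24 1 = [20,21,22,23] from by decide,
      List.filter, PySem.Int.floordiv, PySem.List.pyGet?, PySem.List.pyIdx?]
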